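-- pv_equiv track=rewrite | github.com/HugeChaos/Impossible-differentials-and-impossible-polytopic-transitions | AES/model_build/parsing.py | __word_zero_one_matrix_2_bit_matrix
-- ===== SOURCE A (Python) =====
-- def __word_zero_one_matrix_2_bit_matrix(zero_one_matrix, nibble_size):
--     bit_matrix_row = len(zero_one_matrix) * nibble_size
--     bit_matrix_col = len(zero_one_matrix[0]) * nibble_size
--     nibble_size_matrix = [[0 for j in range(0, nibble_size)] for i in range(0, nibble_size)]
--     for i in range(0, nibble_size):
--         for j in range(0, nibble_size):
--             if i == j:
--                 nibble_size_matrix[i][j] = 1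
--     bit_matrix = [[0 for j in range(0, bit_matrix_col)] for i in range(0, bit_matrix_row)]
--     for row in range(0, len(zero_one_matrix)):
--         for col in range(0, len(zero_one_matrix[0])):
--             if zero_one_matrix[row][col] == 1:
--                 for sub_row in range(0, nibble_size):
--                     for sub_col in range(0, nibble_size):
--                         bit_matrix[row * nibble_size + sub_row][col * nibble_size + sub_col] = nibble_size_matrix[sub_row][sub_col]
--     return bit_matrix
-- ===== SOURCE B (Python) =====
-- def __word_zero_one_matrix_2_bit_matrix(zero_one_matrix, nibble_size):
--     cols = len(zero_one_matrix[0])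
--     bit_matrix = []
--     for word_row in zero_one_matrix:
--         for s in range(nibble_size):
--             bit_row = []
--             for c in range(cols):
--                 v = word_row[c]
--                 bit_row.extend(1 if (v == 1 and k == s) else 0 for k in range(nibble_size))
--             bit_matrix.append(bit_row)
--     return bit_matrix
-- ===== Notes on version B (the rewrite author's own statement) =====
-- stated objective: simpler
-- what changed: B emits each bit row directly (one pass over the word rows, generating the identity-block cells on the fly) instead of pre-allocating a zero bit matrix and an explicit nibble-size identity matrix and stamping blocks into it with four nested index loops and in-place writes.
import Mathlib
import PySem

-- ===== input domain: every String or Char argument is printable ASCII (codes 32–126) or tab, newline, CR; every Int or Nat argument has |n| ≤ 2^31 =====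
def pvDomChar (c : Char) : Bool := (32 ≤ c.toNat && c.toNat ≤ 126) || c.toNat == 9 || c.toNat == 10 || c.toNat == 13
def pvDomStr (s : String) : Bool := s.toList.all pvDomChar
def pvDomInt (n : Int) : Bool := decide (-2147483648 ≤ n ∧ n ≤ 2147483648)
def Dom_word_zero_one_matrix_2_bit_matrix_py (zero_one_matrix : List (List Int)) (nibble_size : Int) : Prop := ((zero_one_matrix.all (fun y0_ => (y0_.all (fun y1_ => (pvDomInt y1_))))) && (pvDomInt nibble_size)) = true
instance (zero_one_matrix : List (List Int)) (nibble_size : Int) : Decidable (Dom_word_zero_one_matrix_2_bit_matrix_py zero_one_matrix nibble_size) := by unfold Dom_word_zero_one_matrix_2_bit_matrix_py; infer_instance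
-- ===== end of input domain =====

-- B builds each bit row directly (emitting the identity-block cells on the fly) instead of
-- pre-allocating a zero matrix and stamping identity blocks into it with four nested index
-- loops; objective: simpler.

-- ===== PORT A =====
-- Python 'mat[i][j] = v'. In port A every executed write has 0 ≤ i < len(mat) and
-- 0 ≤ j < len(mat[i]) (the loop ranges guarantee it), where List.modify/List.set are exact.
def pvSet2 (mat : List (List Int)) (i j : Int) (v : Int) : List (List Int) :=
  mat.modify i.toNat (fun r => r.set j.toNat v)

-- literal transliteration of A; 'zero_one_matrix[0]' (IndexError on []) and the reads
-- 'zero_one_matrix[row][col]' (IndexError on rows shorter than the first) are in range on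
-- every input admitted by Pre_, where pyGetD is exact.
def word_zero_one_matrix_2_bit_matrix_py (zero_one_matrix : List (List Int)) (nibble_size : Int) : List (List Int) :=
  let bit_matrix_row : Int := (zero_one_matrix.length : Int) * nibble_size
  let bit_matrix_col : Int := ((zero_one_matrix.headD []).length : Int) * nibble_size
  let nibble_size_matrix0 :=
    (PySem.List.pyRange 0 nibble_size 1).map (fun _ =>
      (PySem.List.pyRange 0 nibble_size 1).map (fun _ => (0 : Int)))
  let nibble_size_matrix :=
    (PySem.List.pyRange 0 nibble_size 1).foldl (fun m i =>
      (PySem.List.pyRange 0 nibble_size 1).foldl (fun m j =>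
        if i == j then pvSet2 m i j 1 else m) m) nibble_size_matrix0
  let bit_matrix :=
    (PySem.List.pyRange 0 bit_matrix_row 1).map (fun _ =>
      (PySem.List.pyRange 0 bit_matrix_col 1).map (fun _ => (0 : Int)))
  (PySem.List.pyRange 0 (zero_one_matrix.length : Int) 1).foldl (fun bm row =>
    (PySem.List.pyRange 0 ((zero_one_matrix.headD []).length : Int) 1).foldl (fun bm col =>
      if PySem.List.pyGetD (PySem.List.pyGetD zero_one_matrix row []) col 0 == 1 then
        (PySem.List.pyRange 0 nibble_size 1).foldl (fun bm sub_row =>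
          (PySem.List.pyRange 0 nibble_size 1).foldl (fun bm sub_col =>
            pvSet2 bm (row * nibble_size + sub_row) (col * nibble_size + sub_col)
              (PySem.List.pyGetD (PySem.List.pyGetD nibble_size_matrix sub_row []) sub_col 0)) bm) bm
      else bm) bm) bit_matrix

-- ===== PORT B =====
-- transliteration of Source B; 'word_row[c]' is in range on every input admitted by Pre_.
def word_zero_one_matrix_2_bit_matrix_py_alt (zero_one_matrix : List (List Int)) (nibble_size : Int) : List (List Int) :=
  let cols : Int := ((zero_one_matrix.headD []).length : Int)
  zero_one_matrix.flatMap (fun word_row =>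
    (PySem.List.pyRange 0 nibble_size 1).map (fun s =>
      (PySem.List.pyRange 0 cols 1).flatMap (fun c =>
        let v := PySem.List.pyGetD word_row c 0
        (PySem.List.pyRange 0 nibble_size 1).map (fun k =>
          if v == 1 && k == s then (1 : Int) else 0))))

-- ===== PRECONDITION & SPEC =====
-- Pre_ excludes exactly the inputs on which Python A raises IndexError: the empty matrix
-- (zero_one_matrix[0]) and matrices containing a row shorter than the first row
-- (zero_one_matrix[row][col] with col < len(zero_one_matrix[0])).
def Pre_word_zero_one_matrix_2_bit_matrix_py (zero_one_matrix : List (List Int)) (nibble_size : Int) : Prop :=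
  zero_one_matrix ≠ [] ∧
  ∀ r ∈ zero_one_matrix, (zero_one_matrix.headD []).length ≤ r.length

instance (zero_one_matrix : List (List Int)) (nibble_size : Int) : Decidable (Pre_word_zero_one_matrix_2_bit_matrix_py zero_one_matrix nibble_size) := by unfold Pre_word_zero_one_matrix_2_bit_matrix_py; infer_instance

def pvWitness_word_zero_one_matrix_2_bit_matrix_py : List (List Int) × Int := ([[1, 0], [0, 1]], 2)

def Spec_word_zero_one_matrix_2_bit_matrix_py (zero_one_matrix : List (List Int)) (nibble_size : Int) (out : List (List Int)) : Prop := out = word_zero_one_matrix_2_bit_matrix_py_alt zero_one_matrix nibble_size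
instance (zero_one_matrix : List (List Int)) (nibble_size : Int) (out : List (List Int)) : Decidable (Spec_word_zero_one_matrix_2_bit_matrix_py zero_one_matrix nibble_size out) := by unfold Spec_word_zero_one_matrix_2_bit_matrix_py; infer_instance

-- ===== CLAIM (what is proved, stated in full; the proofs are below) =====
def Claim_equal_word_zero_one_matrix_2_bit_matrix_py : Prop := ∀ (zero_one_matrix : List (List Int)) (nibble_size : Int), Dom_word_zero_one_matrix_2_bit_matrix_py zero_one_matrix nibble_size → Pre_word_zero_one_matrix_2_bit_matrix_py zero_one_matrix nibble_size → Spec_word_zero_one_matrix_2_bit_matrix_py zero_one_matrix nibble_size (word_zero_one_matrix_2_bit_matrix_py zero_one_matrix nibble_size)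

-- ===== LEMMAS AND PROOFS =====

-- matrix in "table of a function" form
def pvTab (R C : ℕ) (f : ℕ → ℕ → Int) : List (List Int) :=
  (List.range R).map (fun a => (List.range C).map (f a))

def pvEntry (zom : List (List Int)) (r c : ℕ) : Int := (zom.getD r []).getD c 0

-- the common value of both ports, cellwise
def pvF (zom : List (List Int)) (N a b : ℕ) : Int :=
  if pvEntry zom (a / N) (b / N) = 1 ∧ a % N = b % N then 1 else 0

theorem pvTab_ext {R C : ℕ} {f g : ℕ → ℕ → Int}
    (h : ∀ a, a < R → ∀ b, b < C → f a b = g a b) : pvTab R C f = pvTab R C g := by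
  unfold pvTab
  refine List.map_congr_left (fun a ha => ?_)
  exact List.map_congr_left (fun b hb => h a (List.mem_range.1 ha) b (List.mem_range.1 hb))

theorem pvSet2_tab {R C : ℕ} (f : ℕ → ℕ → Int) {a b : ℕ} (ha : a < R) (hb : b < C) (v : Int) :
    pvSet2 (pvTab R C f) (a : Int) (b : Int) v
      = pvTab R C (fun x y => if x = a ∧ y = b then v else f x y) := by
  unfold pvSet2 pvTab
  simp only [Int.toNat_natCast]
  apply List.ext_getElem
  · simp
  · intro i h1 h2
    simp only [List.getElem_modify, List.getElem_map, List.getElem_range] at *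
    by_cases hia : a = i
    · subst hia
      rw [if_pos rfl]
      apply List.ext_getElem
      · simp
      · intro j h3 h4
        simp only [List.getElem_set, List.getElem_map, List.getElem_range] at *
        by_cases hjb : b = j
        · subst hjb; simp
        · simp [hjb, Ne.symm hjb]
    · rw [if_neg hia]
      apply List.ext_getElem
      · simp
      · intro j h3 h4
        simp only [List.getElem_map, List.getElem_range] at *
        rw [if_neg (fun (h : i = a ∧ j = b) => hia h.1.symm)]

-- one guarded write per element; overwriting is consistent, so g describes the result
theorem pvFoldl_write {α : Type} {R C : ℕ} (cnd : α → Bool) (p q : α → ℕ) (v : α → Int) :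
    ∀ (L : List α) (f g : ℕ → ℕ → Int),
    (∀ x ∈ L, cnd x = true → p x < R ∧ q x < C) →
    (∀ a, a < R → ∀ b, b < C → (∀ x ∈ L, ¬(cnd x = true ∧ p x = a ∧ q x = b)) → g a b = f a b) →
    (∀ x ∈ L, cnd x = true → g (p x) (q x) = v x) →
    L.foldl (fun m x => if cnd x then pvSet2 m (p x) (q x) (v x) else m) (pvTab R C f)
      = pvTab R C g := by
  intro L
  induction L with
  | nil =>
    intro f g _ hg _
    simp only [List.foldl_nil]
    exact pvTab_ext (fun a ha b hb => (hg a ha b hb (by simp)).symm)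
  | cons x L ih =>
    intro f g hrange hg hgt
    simp only [List.foldl_cons]
    by_cases hc : cnd x = true
    · rw [if_pos hc]
      obtain ⟨hpx, hqx⟩ := hrange x (by simp) hc
      rw [pvSet2_tab f hpx hqx]
      apply ih
      · intro y hy hcy; exact hrange y (List.mem_cons_of_mem _ hy) hcy
      · intro a ha b hb huntouched
        by_cases hab : p x = a ∧ q x = b
        · obtain ⟨h1, h2⟩ := hab
          subst h1; subst h2
          rw [hgt x (by simp) hc]; simp
        · rw [if_neg (fun h => hab ⟨h.1.symm, h.2.symm⟩)]
          apply hg a ha b hb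
          intro y hy
          rcases List.mem_cons.1 hy with rfl | hy'
          · exact fun h => hab ⟨h.2.1, h.2.2⟩
          · exact huntouched y hy'
      · intro y hy hcy; exact hgt y (List.mem_cons_of_mem _ hy) hcy
    · rw [if_neg hc]
      apply ih
      · intro y hy hcy; exact hrange y (List.mem_cons_of_mem _ hy) hcy
      · intro a ha b hb huntouched
        apply hg a ha b hb
        intro y hy
        rcases List.mem_cons.1 hy with rfl | hy'
        · exact fun h => hc h.1
        · exact huntouched y hy'
      · intro y hy hcy; exact hgt y (List.mem_cons_of_mem _ hy) hcy

-- nested loops as one loop over pairs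
theorem pvFoldl_flatten {α β γ : Type} (L1 : List α) (L2 : α → List β)
    (F : γ → α → β → γ) (init : γ) :
    L1.foldl (fun m i => (L2 i).foldl (fun m j => F m i j) m) init
      = (L1.flatMap (fun i => (L2 i).map (fun j => (i, j)))).foldl
          (fun m p => F m p.1 p.2) init := by
  induction L1 generalizing init with
  | nil => rfl
  | cons x L ih =>
    simp only [List.flatMap_cons, List.foldl_append, List.foldl_cons, List.foldl_map, ih]

theorem pvFoldl_guard {α γ : Type} (L : List α) (c : Bool) (F : γ → α → γ) (init : γ) :
    (if c then L.foldl F init else init) = L.foldl (fun m x => if c then F m x else m) init := by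
  cases c with
  | false => simp [List.foldl_fixed]
  | true => simp

theorem pvRange_eq (n : Int) :
    PySem.List.pyRange 0 n 1 = (List.range n.toNat).map (fun k : ℕ => (k : Int)) := by
  rw [PySem.List.pyRange_one]
  simp only [Int.sub_zero]
  exact List.map_congr_left (fun k _ => zero_add _)

theorem pvToNat_mul (a : ℕ) (n : Int) : ((a : Int) * n).toNat = a * n.toNat := by
  by_cases h : 0 ≤ n
  · lift n to ℕ using h
    rw [← Int.natCast_mul, Int.toNat_natCast, Int.toNat_natCast]
  · have hn : n ≤ 0 := by omega
    have h1 : (a : Int) * n ≤ 0 :=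
      mul_nonpos_of_nonneg_of_nonpos (Int.natCast_nonneg a) hn
    rw [Int.toNat_of_nonpos h1, Int.toNat_of_nonpos hn]
    simp

-- splitting range (R*N) into blocks
theorem pvRange_mul_flatMap {γ : Type} (R N : ℕ) (h : ℕ → γ) :
    (List.range (R * N)).map h
      = (List.range R).flatMap (fun r => (List.range N).map (fun s => h (r * N + s))) := by
  induction R with
  | zero => simp
  | succ R ih =>
    rw [Nat.succ_mul, List.range_add, List.map_append, ih, List.range_succ,
      List.flatMap_append]
    simp [List.map_map, Function.comp_def]

theorem pvTab_getD {R C : ℕ} (g : ℕ → ℕ → Int) {i j : ℕ} (hi : i < R) (hj : j < C) :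
    (((pvTab R C g).getD i []).getD j 0) = g i j := by
  unfold pvTab
  simp [List.getD_eq_getElem?_getD, hi, hj]

-- the identity-matrix loop of A
theorem pvNsm_eq (n : Int) :
    (PySem.List.pyRange 0 n 1).foldl (fun m i =>
        (PySem.List.pyRange 0 n 1).foldl (fun m j =>
          if i == j then pvSet2 m i j 1 else m) m)
      ((PySem.List.pyRange 0 n 1).map (fun _ =>
        (PySem.List.pyRange 0 n 1).map (fun _ => (0 : Int))))
      = pvTab n.toNat n.toNat (fun i j => if i = j then 1 else 0) := by
  have hinit : ((PySem.List.pyRange 0 n 1).map (fun _ =>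
      (PySem.List.pyRange 0 n 1).map (fun _ => (0 : Int))))
      = pvTab n.toNat n.toNat (fun _ _ => 0) := by
    unfold pvTab
    rw [pvRange_eq]
    apply List.ext_getElem <;> simp [Function.comp_def, List.map_const']
  rw [hinit]
  simp only [pvRange_eq, List.foldl_map]
  rw [pvFoldl_flatten]
  refine pvFoldl_write (fun p : ℕ × ℕ => ((p.1 : Int) == (p.2 : Int)))
    Prod.fst Prod.snd (fun _ => 1) _ _ _ ?_ ?_ ?_
  · intro p hp _
    simp only [List.mem_flatMap, List.mem_map, List.mem_range] at hp
    obtain ⟨i, hi, j, hj, rfl⟩ := hp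
    exact ⟨hi, hj⟩
  · intro a ha b hb huntouched
    have := huntouched (a, b)
      (by simp only [List.mem_flatMap, List.mem_map, List.mem_range]
          exact ⟨a, ha, ⟨b, hb, rfl⟩⟩)
    have hne : a ≠ b := fun hab => this ⟨by simp [hab], rfl, rfl⟩
    simp [hne]
  · intro p _ hc
    simp only [beq_iff_eq, Int.natCast_inj] at hc
    simp [hc]

theorem pvDiv {N : ℕ} (r : ℕ) {s : ℕ} (h : s < N) : (r * N + s) / N = r := by
  rw [mul_comm, Nat.mul_add_div (by omega), Nat.div_eq_of_lt h, Nat.add_zero]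

theorem pvMod {N : ℕ} (r : ℕ) {s : ℕ} (h : s < N) : (r * N + s) % N = s := by
  rw [mul_comm, Nat.mul_add_mod, Nat.mod_eq_of_lt h]

theorem pvF_block (zom : List (List Int)) {N r s c k : ℕ} (hs : s < N) (hk : k < N) :
    pvF zom N (r * N + s) (c * N + k) = if pvEntry zom r c = 1 ∧ s = k then 1 else 0 := by
  unfold pvF
  rw [pvDiv r hs, pvDiv c hk, pvMod r hs, pvMod c hk]

theorem pvFlatMap_congr {α γ : Type} {L : List α} {f g : α → List γ}
    (h : ∀ x ∈ L, f x = g x) : L.flatMap f = L.flatMap g := by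
  induction L with
  | nil => rfl
  | cons x L ih =>
    simp only [List.flatMap_cons, h x (by simp), ih (fun y hy => h y (List.mem_cons_of_mem _ hy))]

theorem pvFlatMap_getD {γ : Type} (zom : List (List Int)) (f : List Int → List γ) :
    zom.flatMap f = (List.range zom.length).flatMap (fun r => f (zom.getD r [])) := by
  induction zom with
  | nil => rfl
  | cons x zom ih =>
    rw [List.flatMap_cons, List.length_cons, List.range_succ_eq_map, List.flatMap_cons,
      List.flatMap_map, ih]
    rfl

theorem pvBm0_eq (rows cols : ℕ) (n : Int) :
    (PySem.List.pyRange 0 ((rows : Int) * n) 1).map (fun _ =>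
      (PySem.List.pyRange 0 ((cols : Int) * n) 1).map (fun _ => (0 : Int)))
      = pvTab (rows * n.toNat) (cols * n.toNat) (fun _ _ => 0) := by
  unfold pvTab
  rw [pvRange_eq, pvRange_eq, pvToNat_mul, pvToNat_mul]
  apply List.ext_getElem <;> simp [Function.comp_def, List.map_const']

-- the quadruple loop domain of A, flattened
theorem pvMemQuad {rows cols N : ℕ} {x : (ℕ × ℕ) × ℕ × ℕ}
    (hx : x ∈ ((List.range rows).flatMap (fun r => (List.range cols).map (fun c => (r, c)))).flatMap
        (fun p => ((List.range N).flatMap (fun sr =>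
          (List.range N).map (fun sc => (sr, sc)))).map (fun q => (p, q)))) :
    x.1.1 < rows ∧ x.1.2 < cols ∧ x.2.1 < N ∧ x.2.2 < N := by
  simp only [List.mem_flatMap, List.mem_map, List.mem_range] at hx
  obtain ⟨p, ⟨r, hr, c, hc, rfl⟩, q, ⟨sr, hsr, sc, hsc, rfl⟩, rfl⟩ := hx
  exact ⟨hr, hc, hsr, hsc⟩

theorem pvMemQuad' {rows cols N : ℕ} {x : (ℕ × ℕ) × ℕ × ℕ}
    (h1 : x.1.1 < rows) (h2 : x.1.2 < cols) (h3 : x.2.1 < N) (h4 : x.2.2 < N) :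
    x ∈ ((List.range rows).flatMap (fun r => (List.range cols).map (fun c => (r, c)))).flatMap
        (fun p => ((List.range N).flatMap (fun sr =>
          (List.range N).map (fun sc => (sr, sc)))).map (fun q => (p, q))) := by
  simp only [List.mem_flatMap, List.mem_map, List.mem_range]
  exact ⟨x.1, ⟨x.1.1, h1, x.1.2, h2, rfl⟩, x.2, ⟨x.2.1, h3, x.2.2, h4, rfl⟩, rfl⟩

-- A's result in table form
theorem pvA_eq_tab (zom : List (List Int)) (n : Int) :
    word_zero_one_matrix_2_bit_matrix_py zom n
      = pvTab (zom.length * n.toNat) ((zom.headD []).length * n.toNat)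
          (pvF zom n.toNat) := by
  simp only [word_zero_one_matrix_2_bit_matrix_py]
  rw [pvNsm_eq n, pvBm0_eq]
  simp only [pvRange_eq, List.foldl_map]
  simp only [pvFoldl_flatten]
  simp only [pvFoldl_guard]
  simp only [pvFoldl_flatten]
  simp only [Int.toNat_natCast]
  refine (PySem.List.foldl_congr_mem _ _ (fun m (x : (ℕ × ℕ) × ℕ × ℕ) =>
      if pvEntry zom x.1.1 x.1.2 == 1 then
        pvSet2 m ((x.1.1 * n.toNat + x.2.1 : ℕ) : Int) ((x.1.2 * n.toNat + x.2.2 : ℕ) : Int)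
          (if x.2.1 = x.2.2 then (1 : Int) else 0)
      else m) _ ?_).trans ?_
  · intro acc x hx
    obtain ⟨hr, hc, hsr, hsc⟩ := pvMemQuad hx
    have hn : (n.toNat : Int) = n := Int.toNat_of_nonneg (by omega)
    have hidx1 : ((x.1.1 : Int) * n + (x.2.1 : Int)) = ((x.1.1 * n.toNat + x.2.1 : ℕ) : Int) := by
      rw [← hn]; push_cast [Int.toNat_natCast]; ring
    have hidx2 : ((x.1.2 : Int) * n + (x.2.2 : Int)) = ((x.1.2 * n.toNat + x.2.2 : ℕ) : Int) := by
      rw [← hn]; push_cast [Int.toNat_natCast]; ring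
    simp only [PySem.List.pyGetD_natCast, pvEntry, hidx1, hidx2, pvTab_getD _ hsr hsc]
    rfl
  · refine pvFoldl_write (fun x : (ℕ × ℕ) × ℕ × ℕ => pvEntry zom x.1.1 x.1.2 == 1)
      (fun x => x.1.1 * n.toNat + x.2.1) (fun x => x.1.2 * n.toNat + x.2.2)
      (fun x => if x.2.1 = x.2.2 then (1 : Int) else 0) _ _ _ ?_ ?_ ?_
    · intro x hx _
      obtain ⟨hr, hc, hsr, hsc⟩ := pvMemQuad hx
      constructor
      · calc x.1.1 * n.toNat + x.2.1 < (x.1.1 + 1) * n.toNat := by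
              rw [Nat.succ_mul]; omega
          _ ≤ zom.length * n.toNat := Nat.mul_le_mul hr (le_refl _)
      · calc x.1.2 * n.toNat + x.2.2 < (x.1.2 + 1) * n.toNat := by
              rw [Nat.succ_mul]; omega
          _ ≤ (zom.headD []).length * n.toNat := Nat.mul_le_mul hc (le_refl _)
    · intro a ha b hb hun
      have hN : 0 < n.toNat := by
        rcases Nat.eq_zero_or_pos n.toNat with h | h
        · rw [h, Nat.mul_zero] at ha; omega
        · exact h
      by_cases he : pvEntry zom (a / n.toNat) (b / n.toNat) = 1
      · exfalso
        refine hun ((a / n.toNat, b / n.toNat), (a % n.toNat, b % n.toNat))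
          (pvMemQuad' ?_ ?_ ?_ ?_) ⟨by simp [he], ?_, ?_⟩
        · exact (Nat.div_lt_iff_lt_mul hN).2 ha
        · exact (Nat.div_lt_iff_lt_mul hN).2 hb
        · exact Nat.mod_lt _ hN
        · exact Nat.mod_lt _ hN
        · show a / n.toNat * n.toNat + a % n.toNat = a
          rw [mul_comm]; exact Nat.div_add_mod a n.toNat
        · show b / n.toNat * n.toNat + b % n.toNat = b
          rw [mul_comm]; exact Nat.div_add_mod b n.toNat
      · simp [pvF, he]
    · intro x hx hc
      obtain ⟨hr, hcc, hsr, hsc⟩ := pvMemQuad hx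
      rw [pvF_block zom hsr hsc]
      simp only [beq_iff_eq] at hc
      simp [hc]

-- B's result in table form
theorem pvB_eq_tab (zom : List (List Int)) (n : Int) :
    word_zero_one_matrix_2_bit_matrix_py_alt zom n
      = pvTab (zom.length * n.toNat) ((zom.headD []).length * n.toNat)
          (pvF zom n.toNat) := by
  simp only [word_zero_one_matrix_2_bit_matrix_py_alt]
  rw [pvFlatMap_getD]
  unfold pvTab
  rw [pvRange_mul_flatMap]
  refine pvFlatMap_congr (fun r hr => ?_)
  rw [pvRange_eq, List.map_map]
  refine List.map_congr_left (fun s hs => ?_)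
  rw [pvRange_mul_flatMap]
  simp only [pvRange_eq, Int.toNat_natCast, List.flatMap_map, List.map_map]
  refine pvFlatMap_congr (fun c hc => ?_)
  refine List.map_congr_left (fun k hk => ?_)
  simp only [List.mem_range] at hs hc hk
  rw [pvF_block zom hs hk]
  simp only [PySem.List.pyGetD_natCast, pvEntry]
  by_cases h2 : s = k
  · subst h2; simp
  · have h2' : ¬ k = s := fun h => h2 h.symm
    simp [h2, h2']

-- ===== VERDICT (by name: the statement is the Claim_ definition above) =====
theorem word_zero_one_matrix_2_bit_matrix_py_spec : Claim_equal_word_zero_one_matrix_2_bit_matrix_py := by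
  intro zom n _ hpre
  unfold Spec_word_zero_one_matrix_2_bit_matrix_py
  rw [pvA_eq_tab zom n, pvB_eq_tab zom n]
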